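-- pv_equiv track=rewrite | github.com/RINGCHEN/TradingAgents-Production-Complete | tradingagents/coordination/code_artisan.py | _identify_code_weaknesses
-- ===== SOURCE A (Python) =====
-- from typing import Dict, List, Optional, Any, Union
--
-- def _identify_code_weaknesses(code: str) -> List[str]:
--     """識別代碼缺點"""
--     weaknesses = []
--
--     if 'TODO' in code:
--         weaknesses.append("包含未完成的TODO項目")
--
--     lines = code.split('\n')
--     long_lines = [line for line in lines if len(line) > 100]
--     if long_lines:
--         weaknesses.append("部分代碼行過長")
--
--     if code.count('\n') > 100:
--         weaknesses.append("函數或類可能過於複雜")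
--
--     return weaknesses
-- ===== SOURCE B (Python) =====
-- from typing import Dict, List, Optional, Any, Union
--
-- def _identify_code_weaknesses(code: str) -> List[str]:
--     """識別代碼缺點 — one streaming character scan with a TODO pattern automaton;
--     no split(), no substring search, no line list is ever built."""
--     PAT = "TODO"
--     nl = 0            # newlines seen
--     cur = 0           # length of the current line so far
--     prog = 0          # automaton state: chars of PAT matched at the end of the current line
--     has_todo = False
--     any_long = False
--     for c in code:
--         if c == '\n':
--             nl += 1
--             if cur > 100:
--                 any_long = True
--             cur = 0
--             prog = 0   # PAT contains no newline, so a match never crosses a line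
--         else:
--             cur += 1
--             if not has_todo:
--                 if c == PAT[prog]:
--                     prog += 1
--                     if prog == 4:
--                         has_todo = True
--                 elif c == 'T':   # KMP fallback: the only border of a prefix of "TODO" is "T"
--                     prog = 1
--                 else:
--                     prog = 0
--     if cur > 100:
--         any_long = True
--     weaknesses = []
--     if has_todo:
--         weaknesses.append("包含未完成的TODO項目")
--     if any_long:
--         weaknesses.append("部分代碼行過長")
--     if nl > 100:
--         weaknesses.append("函數或類可能過於複雜")
--     return weaknesses
-- ===== Notes on version B (the rewrite author's own statement) =====
-- stated objective: alternative
-- what changed: Replaces A's three string-level scans (substring 'TODO' search, split('\n') plus a long-line comprehension, and count('\n')) by a single character-level streaming scan that never builds a line list: an explicit 4-state KMP-style automaton detects 'TODO' (reset at newlines, sound because the pattern contains none), a running line-length counter detects long lines, and newlines are counted in the same pass.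
import Mathlib
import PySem

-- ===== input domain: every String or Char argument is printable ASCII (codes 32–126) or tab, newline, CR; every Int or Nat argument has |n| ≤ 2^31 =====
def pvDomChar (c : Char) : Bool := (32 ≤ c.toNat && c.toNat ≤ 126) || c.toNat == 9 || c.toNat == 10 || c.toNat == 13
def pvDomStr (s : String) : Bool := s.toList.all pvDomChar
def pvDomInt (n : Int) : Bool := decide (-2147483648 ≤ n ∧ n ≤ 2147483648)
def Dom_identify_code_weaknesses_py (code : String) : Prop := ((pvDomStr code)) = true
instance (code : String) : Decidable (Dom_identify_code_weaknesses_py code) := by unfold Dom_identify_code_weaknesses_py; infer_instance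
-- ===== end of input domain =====

-- B replaces A's three string-level scans (substring search, split + long-line comprehension, newline count) by one
-- character-level streaming scan with an explicit 4-state pattern automaton for "TODO"; alternative algorithm, same asymptotic cost.

-- ===== PORT A =====
-- literal transliteration of A: whole-string substring test, split, comprehension (filter), count('\n')
def identify_code_weaknesses_py (code : String) : List String :=
  let weaknesses : List String := []
  let weaknesses := if PySem.Str.isIn "TODO" code then weaknesses ++ ["包含未完成的TODO項目"] else weaknesses
  -- code.split('\n'): the separator is the nonempty literal "\n", so split? is always `some`
  let lines := (PySem.Str.split? code "\n").getD []
  let long_lines := lines.filter (fun line => decide (PySem.Str.len line > 100))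
  let weaknesses := if long_lines ≠ [] then weaknesses ++ ["部分代碼行過長"] else weaknesses
  let weaknesses := if PySem.Str.count code "\n" > 100 then weaknesses ++ ["函數或類可能過於複雜"] else weaknesses
  weaknesses

-- ===== PORT B =====
-- the loop body of Source B, named: state (nl, cur, prog, has_todo, any_long)
def pvStepB (st : Int × Int × Nat × Bool × Bool) (c : Char) : Int × Int × Nat × Bool × Bool :=
  match st with
  | (nl, cur, prog, has_todo, any_long) =>
    if c = '\n' then
      (nl + 1, 0, 0, has_todo, any_long || decide (cur > 100))
    else
      if has_todo then (nl, cur + 1, prog, has_todo, any_long)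
      else
        -- PAT[prog]: prog is 0..3 whenever this is evaluated (once prog reaches 4, has_todo is set)
        if c = "TODO".toList.getD prog ' ' then
          (nl, cur + 1, prog + 1, decide (prog + 1 = 4), any_long)
        else if c = 'T' then (nl, cur + 1, 1, has_todo, any_long)
        else (nl, cur + 1, 0, has_todo, any_long)

-- literal transliteration of B: one fold over the characters, then the trailing cur>100 check and the three appends
def identify_code_weaknesses_py_alt (code : String) : List String :=
  let st := code.toList.foldl pvStepB (0, 0, 0, false, false)
  let any_long := st.2.2.2.2 || decide (st.2.1 > 100)
  let weaknesses : List String := []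
  let weaknesses := if st.2.2.2.1 then weaknesses ++ ["包含未完成的TODO項目"] else weaknesses
  let weaknesses := if any_long then weaknesses ++ ["部分代碼行過長"] else weaknesses
  let weaknesses := if st.1 > 100 then weaknesses ++ ["函數或類可能過於複雜"] else weaknesses
  weaknesses

-- ===== PRECONDITION & SPEC =====
def Spec_identify_code_weaknesses_py (code : String) (out : List String) : Prop := out = identify_code_weaknesses_py_alt code
instance (code : String) (out : List String) : Decidable (Spec_identify_code_weaknesses_py code out) := by unfold Spec_identify_code_weaknesses_py; infer_instance

-- ===== CLAIM (what is proved, stated in full; the proofs are below) =====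
def Claim_equal_identify_code_weaknesses_py : Prop := ∀ (code : String), Dom_identify_code_weaknesses_py code → Spec_identify_code_weaknesses_py code (identify_code_weaknesses_py code)

-- ===== LEMMAS AND PROOFS =====

def splitCh (c : Char) : List Char → List (List Char)
  | [] => [[]]
  | x :: xs =>
    match splitCh c xs with
    | h :: t => if x = c then [] :: h :: t else (x :: h) :: t
    | [] => [[]]

theorem splitCh_ne_nil (c : Char) (l : List Char) : splitCh c l ≠ [] := by
  cases l with
  | nil => simp [splitCh]
  | cons x xs =>
    simp only [splitCh]
    rcases h : splitCh c xs with _ | ⟨a, b⟩ <;> simp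
    split <;> simp

def prependFst (p : List Char) : List (List Char) → List (List Char)
  | [] => [p]
  | h :: t => (p ++ h) :: t

theorem splitCh_cons (c x : Char) (xs : List Char) (a : List Char) (b : List (List Char))
    (hs : splitCh c xs = a :: b) :
    splitCh c (x :: xs) = if x = c then [] :: a :: b else (x :: a) :: b := by
  simp only [splitCh, hs]

theorem go_splitOn (c : Char) :
    ∀ (fuel : Nat) (l cur : List Char) (acc : List (List Char)), l.length < fuel →
      PySem.Chars.splitOn.go [c] fuel l cur acc = acc.reverse ++ prependFst cur.reverse (splitCh c l) := by
  intro fuel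
  induction fuel with
  | zero => intro l cur acc h; omega
  | succ f ih =>
    intro l cur acc h
    cases l with
    | nil =>
      rw [PySem.Chars.splitOn.go]
      all_goals simp [splitCh, prependFst]
    | cons x xs =>
      rw [PySem.Chars.splitOn.go]
      have hlen : xs.length < f := by simpa using h
      by_cases hx : x = c
      · subst hx
        rw [if_pos (by simp [List.isPrefixOf])]
        have hd : List.drop [x].length (x :: xs) = xs := by simp
        rw [hd, ih xs [] _ hlen]
        rcases hs : splitCh x xs with _ | ⟨a, b⟩
        · exact absurd hs (splitCh_ne_nil x xs)
        · rw [splitCh_cons x x xs a b hs, if_pos rfl]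
          simp [prependFst]
      · rw [if_neg (by simp [List.isPrefixOf]; exact fun h => hx h.symm)]
        rw [ih xs (x :: cur) acc hlen]
        rcases hs : splitCh c xs with _ | ⟨a, b⟩
        · exact absurd hs (splitCh_ne_nil c xs)
        · rw [splitCh_cons c x xs a b hs, if_neg hx]
          simp [prependFst]

theorem splitOn_single (c : Char) (s : List Char) :
    PySem.Chars.splitOn s [c] = splitCh c s := by
  rw [PySem.Chars.splitOn, go_splitOn c _ _ _ _ (by omega)]
  rcases hs : splitCh c s with _ | ⟨a, b⟩
  · exact absurd hs (splitCh_ne_nil c s)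
  · simp [prependFst]

theorem count_go_single (c : Char) :
    ∀ (fuel : Nat) (l : List Char) (acc : Nat), l.length ≤ fuel →
      PySem.Chars.count.go [c] fuel l acc = acc + l.count c := by
  intro fuel
  induction fuel with
  | zero =>
    intro l acc h
    have hl : l = [] := List.length_eq_zero_iff.mp (Nat.le_zero.mp h)
    subst hl
    rw [PySem.Chars.count.go]
    simp
  | succ f ih =>
    intro l acc h
    cases l with
    | nil =>
      rw [PySem.Chars.count.go]
      all_goals simp
    | cons x xs =>
      rw [PySem.Chars.count.go]
      have hlen : xs.length ≤ f := by simpa using h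
      by_cases hx : x = c
      · subst hx
        rw [if_pos (by simp [List.isPrefixOf])]
        have hd : List.drop [x].length (x :: xs) = xs := by simp
        rw [hd, ih xs (acc+1) hlen, List.count_cons_self]
        omega
      · rw [if_neg (by simp [List.isPrefixOf]; exact fun h => hx h.symm)]
        rw [ih xs acc hlen, List.count_cons_of_ne hx]

theorem count_single (c : Char) (s : List Char) :
    PySem.Chars.count s [c] = s.count c := by
  rw [PySem.Chars.count]
  rw [if_neg (by simp)]
  simpa using count_go_single c s.length s 0 (le_refl _)

theorem length_splitCh (c : Char) (l : List Char) :
    (splitCh c l).length = l.count c + 1 := by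
  induction l with
  | nil => simp [splitCh]
  | cons x xs ih =>
    rcases hs : splitCh c xs with _ | ⟨a, b⟩
    · exact absurd hs (splitCh_ne_nil c xs)
    · rw [splitCh_cons c x xs a b hs]
      rw [hs] at ih
      by_cases hx : x = c
      · rw [if_pos hx, hx, List.count_cons_self]
        simp at ih ⊢
        omega
      · rw [if_neg hx, List.count_cons_of_ne hx]
        simpa using ih


theorem prefix_takeWhile_of_not_mem {c : Char} :
    ∀ (sub l : List Char), c ∉ sub → (sub <+: l ↔ sub <+: l.takeWhile (fun x => x ≠ c)) := by
  intro sub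
  induction sub with
  | nil => intro l _; simp
  | cons a s' ih =>
    intro l hc
    cases l with
    | nil => simp
    | cons b l' =>
      by_cases hb : b = c
      · subst hb
        rw [List.takeWhile_cons_of_neg (by simp)]
        simp only [List.prefix_nil]
        constructor
        · intro h
          rw [List.cons_prefix_cons] at h
          exact absurd h.1.symm (by intro he; exact hc (he ▸ List.mem_cons_self))
        · intro h; simp at h
      · rw [List.takeWhile_cons_of_pos (by simp [hb])]
        rw [List.cons_prefix_cons, List.cons_prefix_cons]
        have := ih l' (fun hm => hc (List.mem_cons_of_mem a hm))
        tauto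

theorem head_splitCh (c : Char) :
    ∀ l : List Char, ∃ t, splitCh c l = l.takeWhile (fun x => x ≠ c) :: t := by
  intro l
  induction l with
  | nil => exact ⟨[], by simp [splitCh]⟩
  | cons x xs ih =>
    obtain ⟨t, ht⟩ := ih
    by_cases hx : x = c
    · subst hx
      refine ⟨(xs.takeWhile (fun y => y ≠ x)) :: t, ?_⟩
      rw [splitCh_cons x x xs _ t ht, if_pos rfl]
      rw [List.takeWhile_cons_of_neg (by simp)]
    · refine ⟨t, ?_⟩
      rw [splitCh_cons c x xs _ t ht, if_neg hx]
      rw [List.takeWhile_cons_of_pos (by simp [hx])]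

theorem isIn_any_splitCh (sub : List Char) (c : Char) (hc : c ∉ sub) (hne : sub ≠ []) :
    ∀ l : List Char, ((splitCh c l).any (fun seg => PySem.Chars.isIn sub seg)) = PySem.Chars.isIn sub l := by
  intro l
  induction l with
  | nil => simp [splitCh]
  | cons x xs ih =>
    rcases hs : splitCh c xs with _ | ⟨a, b⟩
    · exact absurd hs (splitCh_ne_nil c xs)
    · rw [hs] at ih
      rw [Bool.eq_iff_iff]
      rw [Bool.eq_iff_iff] at ih
      simp only [List.any_eq_true, PySem.Chars.isIn_iff_infix] at *
      by_cases hx : x = c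
      · subst hx
        rw [splitCh_cons x x xs a b hs, if_pos rfl]
        rw [List.infix_cons_iff]
        constructor
        · rintro ⟨seg, hseg, hinf⟩
          rcases List.mem_cons.mp hseg with h0 | hrest
          · subst h0; exact absurd (List.eq_nil_of_infix_nil hinf) hne
          · exact Or.inr (ih.mp ⟨seg, hrest, hinf⟩)
        · rintro (hpre | hinf)
          · rcases sub with _ | ⟨s0, s'⟩
            · exact absurd rfl hne
            · rw [List.cons_prefix_cons] at hpre
              exact absurd hpre.1.symm (fun he => hc (he ▸ List.mem_cons_self))
          · obtain ⟨seg, hseg, h⟩ := ih.mpr hinf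
            exact ⟨seg, List.mem_cons_of_mem _ hseg, h⟩
      · rw [splitCh_cons c x xs a b hs, if_neg hx]
        obtain ⟨t, ht⟩ := head_splitCh c xs
        rw [hs] at ht
        have ha : a = xs.takeWhile (fun y => y ≠ c) := by injection ht
        have htw : (x :: xs).takeWhile (fun y => y ≠ c) = x :: a := by
          rw [List.takeWhile_cons_of_pos (by simp [hx]), ha]
        rw [List.infix_cons_iff]
        constructor
        · rintro ⟨seg, hseg, hinf⟩
          rcases List.mem_cons.mp hseg with h0 | hrest
          · subst h0
            rw [List.infix_cons_iff] at hinf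
            rcases hinf with hpre | hinf2
            · left
              rw [prefix_takeWhile_of_not_mem sub (x :: xs) hc, htw]
              exact hpre
            · right
              apply ih.mp
              exact ⟨a, List.mem_cons_self, hinf2⟩
          · exact Or.inr (ih.mp ⟨seg, List.mem_cons_of_mem _ hrest, hinf⟩)
        · rintro (hpre | hinf)
          · refine ⟨x :: a, List.mem_cons_self, ?_⟩
            rw [prefix_takeWhile_of_not_mem sub (x :: xs) hc, htw] at hpre
            exact hpre.isInfix
          · obtain ⟨seg, hseg, h⟩ := ih.mpr hinf
            rcases List.mem_cons.mp hseg with h0 | hrest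
            · subst h0
              exact ⟨x :: seg, List.mem_cons_self, h.trans (List.suffix_cons x seg).isInfix⟩
            · exact ⟨seg, List.mem_cons_of_mem _ hrest, h⟩

-- no segment produced by splitCh contains the separator
theorem noNL_splitCh (c : Char) :
    ∀ l seg, seg ∈ splitCh c l → c ∉ seg := by
  intro l
  induction l with
  | nil => intro seg h; simp [splitCh] at h; simp [h]
  | cons x xs ih =>
    intro seg h
    rcases hs : splitCh c xs with _ | ⟨a, b⟩
    · exact absurd hs (splitCh_ne_nil c xs)
    · rw [splitCh_cons c x xs a b hs] at h
      by_cases hx : x = c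
      · rw [if_pos hx] at h
        rcases List.mem_cons.mp h with h0 | h1
        · simp [h0]
        · exact ih seg (hs ▸ h1)
      · rw [if_neg hx] at h
        rcases List.mem_cons.mp h with h0 | h1
        · subst h0
          intro hc
          rcases List.mem_cons.mp hc with h2 | h3
          · exact hx h2.symm
          · exact ih a (hs ▸ List.mem_cons_self) h3
        · exact ih seg (hs ▸ List.mem_cons_of_mem a h1)

-- joining the segments back with '\n' recovers the original list
def joinNl : List (List Char) → List Char
  | [] => []
  | [s] => s
  | s :: (r :: rs) => s ++ '\n' :: joinNl (r :: rs)

theorem joinNl_splitCh : ∀ l : List Char, joinNl (splitCh '\n' l) = l := by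
  intro l
  induction l with
  | nil => simp [splitCh, joinNl]
  | cons x xs ih =>
    rcases hs : splitCh '\n' xs with _ | ⟨a, b⟩
    · exact absurd hs (splitCh_ne_nil '\n' xs)
    · rw [hs] at ih
      rw [splitCh_cons '\n' x xs a b hs]
      by_cases hx : x = '\n'
      · rw [if_pos hx, hx]
        rw [joinNl]
        simp [ih]
      · rw [if_neg hx]
        cases b with
        | nil => simp [joinNl] at ih ⊢; exact ih
        | cons c cs =>
          rw [joinNl] at ih ⊢
          simp [ih]

-- suffix/infix step lemmas
theorem suffix_concat_iff (q : List Char) (a : Char) (xs : List Char) (c : Char) :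
    (q ++ [a]) <:+ (xs ++ [c]) ↔ a = c ∧ q <:+ xs := by
  rw [← List.reverse_prefix, List.reverse_append, List.reverse_append]
  simp only [List.reverse_cons, List.reverse_nil, List.nil_append, List.singleton_append]
  rw [List.cons_prefix_cons, List.reverse_prefix]

theorem getLast?_of_suffix (q : List Char) (a : Char) (xs : List Char)
    (h : (q ++ [a]) <:+ xs) : xs.getLast? = some a := by
  obtain ⟨t, ht⟩ := h
  rw [← ht, ← List.append_assoc]
  exact List.getLast?_concat

theorem todo_infix_concat (xs : List Char) (c : Char) :
    (['T','O','D','O'] <:+: (xs ++ [c])) ↔ (['T','O','D','O'] <:+: xs) ∨ (c = 'O' ∧ ['T','O','D'] <:+ xs) := by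
  have h1 : (['T','O','D','O'] : List Char).reverse = ['O','D','O','T'] := by decide
  have h2 : (['O','D','O','T'] : List Char) = 'O' :: ['D','O','T'] := rfl
  have h3 : (['T','O','D'] : List Char).reverse = ['D','O','T'] := by decide
  rw [← List.reverse_infix, List.reverse_append, h1]
  have h4 : ([c] : List Char).reverse = [c] := by simp
  rw [h4, List.singleton_append, h2, List.infix_cons_iff, List.cons_prefix_cons]
  rw [← h2, ← h1, List.reverse_infix, ← h3, List.reverse_prefix]
  constructor
  · rintro (⟨ha, hb⟩ | h)
    · exact Or.inr ⟨ha.symm, hb⟩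
    · exact Or.inl h
  · rintro (h | ⟨ha, hb⟩)
    · exact Or.inr h
    · exact Or.inl ⟨ha.symm, hb⟩

-- the automaton's border function: longest proper prefix of "TODO" that is a suffix of xs
def mB (xs : List Char) : Nat :=
  if ['T','O','D'] <:+ xs then 3 else if ['T','O'] <:+ xs then 2 else if ['T'] <:+ xs then 1 else 0

-- per-segment invariant: folding pvStepB over a newline-free segment
theorem seg_fold (xs : List Char) (h : '\n' ∉ xs) (nl : Int) (ht al : Bool) :
    ∃ p, xs.foldl pvStepB (nl, 0, 0, ht, al) =
      (nl, (xs.length : Int), p, ht || decide (['T','O','D','O'] <:+: xs), al) ∧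
      ((ht || decide (['T','O','D','O'] <:+: xs)) = false → p = mB xs) := by
  induction xs using List.reverseRecOn with
  | nil =>
    exact ⟨0, by simp, fun _ => by decide⟩
  | append_singleton xs c ih =>
    have hxs : '\n' ∉ xs := fun hc => h (List.mem_append_left _ hc)
    have hcnl : c ≠ '\n' := fun hc => h (by simp [hc])
    obtain ⟨p, heq, hp⟩ := ih hxs
    rw [List.foldl_append, heq, List.foldl_cons, List.foldl_nil]
    by_cases hT : (ht || decide (['T','O','D','O'] <:+: xs)) = true
    · -- has_todo already set: state frozen apart from cur
      refine ⟨p, ?_, ?_⟩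
      · rw [pvStepB, if_neg hcnl, if_pos hT]
        have : (ht || decide (['T','O','D','O'] <:+: (xs ++ [c]))) = true := by
          rcases Bool.or_eq_true_iff.mp hT with h1 | h1
          · simp [h1]
          · have : ['T','O','D','O'] <:+: (xs ++ [c]) :=
              ((todo_infix_concat xs c).mpr (Or.inl (of_decide_eq_true h1)))
            simp [this]
        rw [this, hT]
        simp
      · intro hcon
        rw [Bool.or_eq_true_iff] at hT
        rw [Bool.or_eq_false_iff] at hcon
        rcases hT with h1 | h1
        · rw [hcon.1] at h1; exact absurd h1 (by simp)
        · exact absurd ((todo_infix_concat xs c).mpr (Or.inl (of_decide_eq_true h1)))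
            (of_decide_eq_false hcon.2)
    · -- has_todo not yet: p = mB xs, run the automaton case analysis
      rw [Bool.not_eq_true] at hT
      have hht : ht = false := (Bool.or_eq_false_iff.mp hT).1
      have hinf : ¬ (['T','O','D','O'] <:+: xs) :=
        of_decide_eq_false (Bool.or_eq_false_iff.mp hT).2
      have hpv : p = mB xs := hp hT
      rw [pvStepB, if_neg hcnl, hT]
      rw [if_neg (by simp)]
      -- facts about suffixes of xs
      by_cases h3 : ['T','O','D'] <:+ xs
      · -- mB xs = 3
        have hm : mB xs = 3 := by rw [mB, if_pos h3]
        by_cases hc : c = 'O'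
        · -- completes the match
          have hnew : ['T','O','D','O'] <:+: (xs ++ [c]) :=
            (todo_infix_concat xs c).mpr (Or.inr ⟨hc, h3⟩)
          refine ⟨p + 1, ?_, ?_⟩
          · rw [hpv, hm]
            rw [if_pos (by rw [hc]; decide)]
            simp [hnew]
          · intro hcon
            rw [Bool.or_eq_false_iff] at hcon
            exact absurd hnew (of_decide_eq_false hcon.2)
        · -- mismatch at state 3
          have hnot : ¬ (['T','O','D','O'] <:+: (xs ++ [c])) := by
            rw [todo_infix_concat]
            rintro (h1 | ⟨h1, _⟩)
            · exact hinf h1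
            · exact hc h1
          have hgl : xs.getLast? = some 'D' := getLast?_of_suffix ['T','O'] 'D' xs h3
          have hnTO : ¬ (['T','O'] <:+ (xs ++ [c])) := by
            rw [show (['T','O'] : List Char) = ['T'] ++ ['O'] from rfl, suffix_concat_iff]
            rintro ⟨h1, _⟩; exact hc h1.symm
          have hnTOD : ¬ (['T','O','D'] <:+ (xs ++ [c])) := by
            rw [show (['T','O','D'] : List Char) = ['T','O'] ++ ['D'] from rfl, suffix_concat_iff]
            rintro ⟨h1, h2⟩
            have := getLast?_of_suffix ['T'] 'O' xs h2
            rw [hgl] at this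
            exact absurd (Option.some.inj this) (by decide)
          rw [if_neg (by rw [hpv, hm]; simpa using fun h => hc h)]
          by_cases hcT : c = 'T'
          · refine ⟨1, by rw [if_pos hcT]; simp [hnot, hht], ?_⟩
            intro _
            rw [mB, if_neg hnTOD, if_neg hnTO,
              if_pos (by rw [show (['T'] : List Char) = [] ++ ['T'] from rfl, suffix_concat_iff]; exact ⟨hcT.symm, List.nil_suffix⟩)]
          · refine ⟨0, by rw [if_neg hcT]; simp [hnot, hht], ?_⟩
            intro _
            have hnT : ¬ (['T'] <:+ (xs ++ [c])) := by
              rw [show (['T'] : List Char) = [] ++ ['T'] from rfl, suffix_concat_iff]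
              rintro ⟨h1, _⟩; exact hcT h1.symm
            rw [mB, if_neg hnTOD, if_neg hnTO, if_neg hnT]
      · by_cases h2 : ['T','O'] <:+ xs
        · -- mB xs = 2, expected char 'D'
          have hm : mB xs = 2 := by rw [mB, if_neg h3, if_pos h2]
          have hgl : xs.getLast? = some 'O' := getLast?_of_suffix ['T'] 'O' xs h2
          have hnot : ¬ (['T','O','D','O'] <:+: (xs ++ [c])) := by
            rw [todo_infix_concat]
            rintro (h1 | ⟨_, h1⟩)
            · exact hinf h1
            · exact h3 h1
          have hnT : ¬ (['T'] <:+ xs) := by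
            intro h1
            have := getLast?_of_suffix [] 'T' xs (by simpa using h1)
            rw [hgl] at this
            exact absurd (Option.some.inj this) (by decide)
          by_cases hc : c = 'D'
          · refine ⟨p + 1, ?_, ?_⟩
            · rw [if_pos (by rw [hpv, hm, hc]; decide)]
              rw [hpv, hm]
              simp [hnot, hht]
            · intro _
              rw [hpv, hm, mB,
                if_pos ((by rw [show (['T','O','D'] : List Char) = ['T','O'] ++ ['D'] from rfl, suffix_concat_iff]; exact ⟨hc.symm, h2⟩) : ['T','O','D'] <:+ (xs ++ [c]))]
          · rw [if_neg (by rw [hpv, hm]; simpa using fun h => hc h)]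
            have hnTOD : ¬ (['T','O','D'] <:+ (xs ++ [c])) := by
              rw [show (['T','O','D'] : List Char) = ['T','O'] ++ ['D'] from rfl, suffix_concat_iff]
              rintro ⟨h1, _⟩; exact hc h1.symm
            by_cases hcT : c = 'T'
            · refine ⟨1, by rw [if_pos hcT]; simp [hnot, hht], ?_⟩
              intro _
              have hnTO : ¬ (['T','O'] <:+ (xs ++ [c])) := by
                rw [show (['T','O'] : List Char) = ['T'] ++ ['O'] from rfl, suffix_concat_iff]
                rintro ⟨h1, _⟩; rw [hcT] at h1; exact absurd h1.symm (by decide)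
              rw [mB, if_neg hnTOD, if_neg hnTO,
                if_pos (by rw [show (['T'] : List Char) = [] ++ ['T'] from rfl, suffix_concat_iff]; exact ⟨hcT.symm, List.nil_suffix⟩)]
            · refine ⟨0, by rw [if_neg hcT]; simp [hnot, hht], ?_⟩
              intro _
              have hnTO : ¬ (['T','O'] <:+ (xs ++ [c])) := by
                rw [show (['T','O'] : List Char) = ['T'] ++ ['O'] from rfl, suffix_concat_iff]
                rintro ⟨_, h1⟩; exact hnT h1
              have hnT' : ¬ (['T'] <:+ (xs ++ [c])) := by
                rw [show (['T'] : List Char) = [] ++ ['T'] from rfl, suffix_concat_iff]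
                rintro ⟨h1, _⟩; exact hcT h1.symm
              rw [mB, if_neg hnTOD, if_neg hnTO, if_neg hnT']
        · by_cases h1 : ['T'] <:+ xs
          · -- mB xs = 1, expected char 'O'
            have hm : mB xs = 1 := by rw [mB, if_neg h3, if_neg h2, if_pos h1]
            have hnot : ¬ (['T','O','D','O'] <:+: (xs ++ [c])) := by
              rw [todo_infix_concat]
              rintro (hh | ⟨_, hh⟩)
              · exact hinf hh
              · exact h3 hh
            have hnTOD : ¬ (['T','O','D'] <:+ (xs ++ [c])) := by
              rw [show (['T','O','D'] : List Char) = ['T','O'] ++ ['D'] from rfl, suffix_concat_iff]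
              rintro ⟨_, hh⟩; exact h2 hh
            by_cases hc : c = 'O'
            · refine ⟨p + 1, ?_, ?_⟩
              · rw [if_pos (by rw [hpv, hm, hc]; decide)]
                rw [hpv, hm]
                simp [hnot, hht]
              · intro _
                rw [hpv, hm, mB, if_neg hnTOD,
                  if_pos ((by rw [show (['T','O'] : List Char) = ['T'] ++ ['O'] from rfl, suffix_concat_iff]; exact ⟨hc.symm, h1⟩) : ['T','O'] <:+ (xs ++ [c]))]
            · rw [if_neg (by rw [hpv, hm]; simpa using fun h => hc h)]
              by_cases hcT : c = 'T'
              · refine ⟨1, by rw [if_pos hcT]; simp [hnot, hht], ?_⟩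
                intro _
                have hnTO : ¬ (['T','O'] <:+ (xs ++ [c])) := by
                  rw [show (['T','O'] : List Char) = ['T'] ++ ['O'] from rfl, suffix_concat_iff]
                  rintro ⟨hh, _⟩; exact hc hh.symm
                rw [mB, if_neg hnTOD, if_neg hnTO,
                  if_pos (by rw [show (['T'] : List Char) = [] ++ ['T'] from rfl, suffix_concat_iff]; exact ⟨hcT.symm, List.nil_suffix⟩)]
              · refine ⟨0, by rw [if_neg hcT]; simp [hnot, hht], ?_⟩
                intro _
                have hnTO : ¬ (['T','O'] <:+ (xs ++ [c])) := by
                  rw [show (['T','O'] : List Char) = ['T'] ++ ['O'] from rfl, suffix_concat_iff]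
                  rintro ⟨hh, _⟩; exact hc hh.symm
                have hnT' : ¬ (['T'] <:+ (xs ++ [c])) := by
                  rw [show (['T'] : List Char) = [] ++ ['T'] from rfl, suffix_concat_iff]
                  rintro ⟨hh, _⟩; exact hcT hh.symm
                rw [mB, if_neg hnTOD, if_neg hnTO, if_neg hnT']
          · -- mB xs = 0, expected char 'T'
            have hm : mB xs = 0 := by rw [mB, if_neg h3, if_neg h2, if_neg h1]
            have hnot : ¬ (['T','O','D','O'] <:+: (xs ++ [c])) := by
              rw [todo_infix_concat]
              rintro (hh | ⟨_, hh⟩)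
              · exact hinf hh
              · exact h3 hh
            have hnTOD : ¬ (['T','O','D'] <:+ (xs ++ [c])) := by
              rw [show (['T','O','D'] : List Char) = ['T','O'] ++ ['D'] from rfl, suffix_concat_iff]
              rintro ⟨_, hh⟩; exact h2 hh
            have hnTO : ¬ (['T','O'] <:+ (xs ++ [c])) := by
              rw [show (['T','O'] : List Char) = ['T'] ++ ['O'] from rfl, suffix_concat_iff]
              rintro ⟨_, hh⟩; exact h1 hh
            by_cases hc : c = 'T'
            · refine ⟨p + 1, ?_, ?_⟩
              · rw [if_pos (by rw [hpv, hm, hc]; decide)]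
                rw [hpv, hm]
                simp [hnot, hht]
              · intro _
                rw [hpv, hm, mB, if_neg hnTOD, if_neg hnTO,
                  if_pos (by rw [show (['T'] : List Char) = [] ++ ['T'] from rfl, suffix_concat_iff]; exact ⟨hc.symm, List.nil_suffix⟩)]
            · rw [if_neg (by rw [hpv, hm]; simpa using fun h => hc h), if_neg hc]
              refine ⟨0, by simp [hnot, hht], ?_⟩
              intro _
              have hnT' : ¬ (['T'] <:+ (xs ++ [c])) := by
                rw [show (['T'] : List Char) = [] ++ ['T'] from rfl, suffix_concat_iff]
                rintro ⟨hh, _⟩; exact hc hh.symm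
              rw [mB, if_neg hnTOD, if_neg hnTO, if_neg hnT']

-- folding over the joined segments
theorem fold_join :
    ∀ (rest : List (List Char)) (s : List Char), '\n' ∉ s → (∀ t ∈ rest, '\n' ∉ t) →
    ∀ (nl : Int) (ht al : Bool),
    ∃ p, (joinNl (s :: rest)).foldl pvStepB (nl, 0, 0, ht, al) =
      (nl + (rest.length : Int),
       (((s :: rest).getLast (List.cons_ne_nil s rest)).length : Int), p,
       ht || (s :: rest).any (fun t => decide (['T','O','D','O'] <:+: t)),
       al || (s :: rest).dropLast.any (fun t => decide ((t.length : Int) > 100))) := by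
  intro rest
  induction rest with
  | nil =>
    intro s hs _ nl ht al
    obtain ⟨p, heq, _⟩ := seg_fold s hs nl ht al
    refine ⟨p, ?_⟩
    rw [joinNl, heq]
    simp
  | cons r rs ih =>
    intro s hs hrest nl ht al
    have hr : '\n' ∉ r := hrest r List.mem_cons_self
    have hrs : ∀ t ∈ rs, '\n' ∉ t := fun t htm => hrest t (List.mem_cons_of_mem r htm)
    obtain ⟨p1, heq1, _⟩ := seg_fold s hs nl ht al
    obtain ⟨p2, heq2⟩ := ih r hr hrs (nl + 1)
      (ht || decide (['T','O','D','O'] <:+: s)) (al || decide ((s.length : Int) > 100))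
    refine ⟨p2, ?_⟩
    rw [joinNl, List.foldl_append, heq1, List.foldl_cons]
    have hstep : pvStepB (nl, (s.length : Int), p1, ht || decide (['T','O','D','O'] <:+: s), al) '\n'
        = (nl + 1, 0, 0, ht || decide (['T','O','D','O'] <:+: s), al || decide ((s.length : Int) > 100)) := by
      rw [pvStepB]
      simp
    rw [hstep, heq2]
    refine Prod.ext ?_ (Prod.ext ?_ (Prod.ext rfl (Prod.ext ?_ ?_)))
    · simp
      omega
    · simp [List.getLast_cons]
    · simp [Bool.or_assoc]
    · simp [Bool.or_assoc]

-- any over a nonempty list split as dropLast plus last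
theorem any_dropLast_last (l : List (List Char)) (h : l ≠ []) (P : List Char → Bool) :
    l.any P = (l.dropLast.any P || P (l.getLast h)) := by
  conv_lhs => rw [← List.dropLast_append_getLast h]
  simp

theorem ports_eq (code : String) :
    identify_code_weaknesses_py code = identify_code_weaknesses_py_alt code := by
  have hlines : (PySem.Str.split? code "\n").getD [] = (splitCh '\n' code.toList).map String.ofList := by
    rw [PySem.Str.split?.eq_1]
    rw [PySem.Chars.split?.eq_1, if_neg (by simp)]
    simp [splitOn_single]
  rcases hsegs : splitCh '\n' code.toList with _ | ⟨s, rest⟩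
  · exact absurd hsegs (splitCh_ne_nil '\n' code.toList)
  have hjoin : code.toList = joinNl (s :: rest) := by
    rw [← hsegs, joinNl_splitCh]
  have hnnl : ∀ t ∈ (s :: rest), '\n' ∉ t := fun t htm => noNL_splitCh '\n' code.toList t (hsegs ▸ htm)
  obtain ⟨p, hfold⟩ := fold_join rest s (hnnl s List.mem_cons_self)
    (fun t htm => hnnl t (List.mem_cons_of_mem s htm)) 0 false false
  -- the three conditions of A expressed over the segments
  have hTODO : PySem.Str.isIn "TODO" code
      = (s :: rest).any (fun t => decide (['T','O','D','O'] <:+: t)) := by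
    rw [PySem.Str.isIn_eq,
      ← isIn_any_splitCh "TODO".toList '\n' (by decide) (by decide) code.toList, hsegs]
    congr 1
    funext t
    rw [Bool.eq_iff_iff, PySem.Chars.isIn_iff_infix, decide_eq_true_iff]
    have hpat : ("TODO" : String).toList = ['T','O','D','O'] := by decide
    rw [hpat]
  have hcount : PySem.Str.count code "\n" = rest.length := by
    rw [PySem.Str.count_eq]
    have ht : ("\n" : String).toList = ['\n'] := by decide
    rw [ht, count_single]
    have := length_splitCh '\n' code.toList
    rw [hsegs] at this
    simp at this
    omega
  have hlong : ((splitCh '\n' code.toList).map String.ofList).filter (fun line => decide (PySem.Str.len line > 100)) ≠ []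
      ↔ ((s :: rest).dropLast.any (fun t => decide ((t.length : Int) > 100))
         || decide ((((s :: rest).getLast (List.cons_ne_nil s rest)).length : Int) > 100)) = true := by
    rw [← any_dropLast_last (s :: rest) (List.cons_ne_nil s rest)
        (fun t => decide ((t.length : Int) > 100))]
    rw [hsegs, Ne, List.filter_eq_nil_iff]
    push Not
    simp [PySem.Str.len_eq]
  rw [← hjoin] at hfold
  simp only [identify_code_weaknesses_py, identify_code_weaknesses_py_alt]
  rw [hlines, hfold]
  simp only [Bool.false_or]
  rw [hTODO]
  have e2 : (((splitCh '\n' code.toList).map String.ofList).filter (fun line => decide (PySem.Str.len line > 100)) ≠ []) =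
      (((s :: rest).dropLast.any (fun t => decide ((t.length : Int) > 100))
        || decide ((((s :: rest).getLast (List.cons_ne_nil s rest)).length : Int) > 100)) = true) :=
    propext hlong
  have e3 : (PySem.Str.count code "\n" > 100) = ((0 : Int) + (rest.length : Int) > 100) := by
    apply propext
    rw [hcount]
    omega
  simp only [e2, e3]


-- ===== VERDICT (by name: the statement is the Claim_ definition above) =====
theorem identify_code_weaknesses_py_spec : Claim_equal_identify_code_weaknesses_py := by
  intro code _
  unfold Spec_identify_code_weaknesses_py
  exact ports_eq code
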